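-- pv_equiv track=rewrite | github.com/Iroli007/ocdoctor | backend/src/tcm_study_app/services/document_library.py | _merge_lines_into_blocks
-- ===== SOURCE A (Python) =====
-- def _merge_lines_into_blocks(lines: list[str]) -> list[str]:
--     """Merge line-based PDFs into paragraph-like blocks."""
--     blocks = []
--     buffer = []
--     for line in lines:
--         cleaned = line.strip()
--         if not cleaned:
--             if buffer:
--                 blocks.append(" ".join(buffer))
--                 buffer = []
--             continue
--         buffer.append(cleaned)
--         if len(" ".join(buffer)) >= 240:
--             blocks.append(" ".join(buffer))
--             buffer = []
--     if buffer:
--         blocks.append(" ".join(buffer))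
--     return blocks
-- ===== SOURCE B (Python) =====
-- def _merge_lines_into_blocks(lines: list[str]) -> list[str]:
--     """Merge line-based PDFs into paragraph-like blocks."""
--     cleaned = [line.strip() for line in lines]
--     # pass 1: maximal runs of non-blank cleaned lines, blank lines are separators
--     groups = []
--     i, n = 0, len(cleaned)
--     while i < n:
--         if not cleaned[i]:
--             i += 1
--             continue
--         j = i
--         while j < n and cleaned[j]:
--             j += 1
--         groups.append(cleaned[i:j])
--         i = j
--     # pass 2: pack each run into blocks at the >= 240 joined-length boundary
--     blocks = []
--     for grp in groups:
--         buf = []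
--         for part in grp:
--             buf.append(part)
--             if len(" ".join(buf)) >= 240:
--                 blocks.append(" ".join(buf))
--                 buf = []
--         if buf:
--             blocks.append(" ".join(buf))
--     return blocks
-- ===== Notes on version B (the rewrite author's own statement) =====
-- stated objective: alternative
-- what changed: A single stateful fold interleaving flushing and packing is replaced by two passes: first split the stripped lines into maximal non-blank runs (blank lines as separators), then pack each run independently into blocks at the joined-length boundary.
import Mathlib
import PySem

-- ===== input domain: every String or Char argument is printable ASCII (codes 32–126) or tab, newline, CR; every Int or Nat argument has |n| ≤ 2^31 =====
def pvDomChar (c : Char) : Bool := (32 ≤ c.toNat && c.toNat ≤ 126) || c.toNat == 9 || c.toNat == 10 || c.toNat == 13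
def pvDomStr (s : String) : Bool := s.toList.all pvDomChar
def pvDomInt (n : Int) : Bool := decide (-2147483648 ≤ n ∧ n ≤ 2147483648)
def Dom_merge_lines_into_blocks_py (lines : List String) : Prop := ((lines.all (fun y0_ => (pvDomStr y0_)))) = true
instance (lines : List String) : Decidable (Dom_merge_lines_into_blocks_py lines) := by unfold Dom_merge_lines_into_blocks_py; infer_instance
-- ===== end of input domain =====

-- B restructures A's single stateful fold into two passes (split into non-blank runs, then pack each run); same results, same cost (objective: alternative).

-- ===== PORT A =====
-- one loop iteration of A: state = (blocks, buffer)
def mlStepA (st : List String × List String) (line : String) : List String × List String :=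
  let cleaned := PySem.Str.strip line
  if cleaned == "" then
    if st.2.isEmpty then st else (st.1 ++ [PySem.Str.join " " st.2], [])
  else
    let nb := st.2 ++ [cleaned]
    if 240 ≤ PySem.Str.len (PySem.Str.join " " nb) then (st.1 ++ [PySem.Str.join " " nb], [])
    else (st.1, nb)

def merge_lines_into_blocks_py (lines : List String) : List String :=
  let st := lines.foldl mlStepA ([], [])
  st.1 ++ (if st.2.isEmpty then [] else [PySem.Str.join " " st.2])

-- ===== PORT B =====
-- pass 1: maximal runs of non-blank cleaned lines (blank lines are separators)
def mlGroups : List String → List (List String)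
  | [] => []
  | c :: rest =>
    if c == "" then mlGroups rest
    else (c :: rest.takeWhile (fun s => !(s == ""))) :: mlGroups (rest.dropWhile (fun s => !(s == "")))
termination_by cl => cl.length
decreasing_by
  · simp
  · exact Nat.lt_succ_of_le (List.length_dropWhile_le _ _)

-- pass 2: pack one run into blocks at the ≥ 240 joined-length boundary
def mlPack : List String → List String → List String
  | buf, [] => if buf.isEmpty then [] else [PySem.Str.join " " buf]
  | buf, c :: grp =>
    let nb := buf ++ [c]
    if 240 ≤ PySem.Str.len (PySem.Str.join " " nb) then PySem.Str.join " " nb :: mlPack [] grp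
    else mlPack nb grp

def merge_lines_into_blocks_py_alt (lines : List String) : List String :=
  (mlGroups (lines.map PySem.Str.strip)).flatMap (mlPack [])

-- ===== PRECONDITION & SPEC =====
def Spec_merge_lines_into_blocks_py (lines : List String) (out : List String) : Prop := out = merge_lines_into_blocks_py_alt lines
instance (lines : List String) (out : List String) : Decidable (Spec_merge_lines_into_blocks_py lines out) := by unfold Spec_merge_lines_into_blocks_py; infer_instance

-- ===== CLAIM (what is proved, stated in full; the proofs are below) =====
def Claim_equal_merge_lines_into_blocks_py : Prop := ∀ (lines : List String), Dom_merge_lines_into_blocks_py lines → Spec_merge_lines_into_blocks_py lines (merge_lines_into_blocks_py lines)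

-- ===== LEMMAS AND PROOFS =====

-- continuation semantics of A's loop: result of the remaining iterations from buffer `buf`
def mlRun : List String → List String → List String
  | buf, [] => if buf.isEmpty then [] else [PySem.Str.join " " buf]
  | buf, line :: rest =>
    let c := PySem.Str.strip line
    if c == "" then
      (if buf.isEmpty then [] else [PySem.Str.join " " buf]) ++ mlRun [] rest
    else
      let nb := buf ++ [c]
      if 240 ≤ PySem.Str.len (PySem.Str.join " " nb) then PySem.Str.join " " nb :: mlRun [] rest
      else mlRun nb rest

-- A's final flush
def mlFinish (st : List String × List String) : List String :=
  st.1 ++ (if st.2.isEmpty then [] else [PySem.Str.join " " st.2])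

theorem mlRun_foldA (ls : List String) : ∀ (blocks buf : List String),
    mlFinish (ls.foldl mlStepA (blocks, buf)) = blocks ++ mlRun buf ls := by
  induction ls with
  | nil => intro blocks buf; simp only [List.foldl_nil, mlFinish, mlRun]
  | cons l rest ih =>
    intro blocks buf
    rw [List.foldl_cons]
    by_cases h : (PySem.Str.strip l == "") = true
    · by_cases hb : buf.isEmpty = true
      · have hb' : buf = [] := List.isEmpty_iff.mp hb
        subst hb'
        have e1 : mlStepA (blocks, []) l = (blocks, []) := by
          simp only [mlStepA]; rw [if_pos h]; rfl
        have r1 : mlRun [] (l :: rest) = mlRun [] rest := by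
          simp only [mlRun]; rw [if_pos h]; rfl
        rw [e1, ih, r1]
      · have e1 : mlStepA (blocks, buf) l = (blocks ++ [PySem.Str.join " " buf], []) := by
          simp only [mlStepA]; rw [if_pos h, if_neg hb]
        have r1 : mlRun buf (l :: rest)
            = [PySem.Str.join " " buf] ++ mlRun [] rest := by
          simp only [mlRun]; rw [if_pos h, if_neg hb]
        rw [e1, ih, r1, List.append_assoc]
    · by_cases hlen : 240 ≤ PySem.Str.len (PySem.Str.join " " (buf ++ [PySem.Str.strip l]))
      · have e1 : mlStepA (blocks, buf) l
            = (blocks ++ [PySem.Str.join " " (buf ++ [PySem.Str.strip l])], []) := by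
          simp only [mlStepA]; rw [if_neg h, if_pos hlen]
        have r1 : mlRun buf (l :: rest)
            = PySem.Str.join " " (buf ++ [PySem.Str.strip l]) :: mlRun [] rest := by
          simp only [mlRun]; rw [if_neg h, if_pos hlen]
        rw [e1, ih, r1, List.append_assoc]; rfl
      · have e1 : mlStepA (blocks, buf) l = (blocks, buf ++ [PySem.Str.strip l]) := by
          simp only [mlStepA]; rw [if_neg h, if_neg hlen]
        have r1 : mlRun buf (l :: rest) = mlRun (buf ++ [PySem.Str.strip l]) rest := by
          simp only [mlRun]; rw [if_neg h, if_neg hlen]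
        rw [e1, ih, r1]

-- unfolding one run of mlGroups under the flatMap
theorem flatMap_mlGroups_split (cl : List String) :
    (mlGroups cl).flatMap (mlPack [])
      = mlPack [] (cl.takeWhile (fun s => !(s == "")))
        ++ (mlGroups (cl.dropWhile (fun s => !(s == "")))).flatMap (mlPack []) := by
  cases cl with
  | nil => simp [mlGroups, mlPack]
  | cons c rest =>
    by_cases h : (c == "") = true
    · have hc : ¬((!(c == "")) = true) := by simp [h]
      rw [List.takeWhile_cons, List.dropWhile_cons, if_neg hc, if_neg hc]
      have hg : mlGroups (c :: rest) = mlGroups rest := by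
        rw [mlGroups]; rw [if_pos h]
      rw [hg]
      simp only [mlPack, List.isEmpty_nil, if_true, List.nil_append]
    · have hc : (!(c == "")) = true := by simp [h]
      rw [List.takeWhile_cons, List.dropWhile_cons, if_pos hc, if_pos hc]
      rw [mlGroups, if_neg h, List.flatMap_cons]

theorem mlRun_eq_pack (ls : List String) : ∀ (buf : List String),
    mlRun buf ls
      = mlPack buf ((ls.map PySem.Str.strip).takeWhile (fun s => !(s == "")))
        ++ (mlGroups ((ls.map PySem.Str.strip).dropWhile (fun s => !(s == "")))).flatMap (mlPack []) := by
  induction ls with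
  | nil => intro buf; simp only [List.map_nil, List.takeWhile_nil, List.dropWhile_nil,
      mlRun, mlGroups, mlPack, List.flatMap_nil, List.append_nil]
  | cons l rest ih =>
    intro buf
    rw [List.map_cons, List.takeWhile_cons, List.dropWhile_cons]
    by_cases h : (PySem.Str.strip l == "") = true
    · have hc : ¬((!(PySem.Str.strip l == "")) = true) := by simp [h]
      rw [if_neg hc, if_neg hc]
      have r1 : mlRun buf (l :: rest)
          = (if buf.isEmpty then [] else [PySem.Str.join " " buf]) ++ mlRun [] rest := by
        simp only [mlRun]; rw [if_pos h]
      have hg : mlGroups (PySem.Str.strip l :: rest.map PySem.Str.strip)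
          = mlGroups (rest.map PySem.Str.strip) := by
        rw [mlGroups]; rw [if_pos h]
      have mp0 : mlPack buf [] = (if buf.isEmpty then [] else [PySem.Str.join " " buf]) := by
        simp only [mlPack]
      rw [r1, ih [], ← flatMap_mlGroups_split, hg, mp0]
    · have hc : (!(PySem.Str.strip l == "")) = true := by simp [h]
      rw [if_pos hc, if_pos hc]
      by_cases hlen : 240 ≤ PySem.Str.len (PySem.Str.join " " (buf ++ [PySem.Str.strip l]))
      · have r1 : mlRun buf (l :: rest)
            = PySem.Str.join " " (buf ++ [PySem.Str.strip l]) :: mlRun [] rest := by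
          simp only [mlRun]; rw [if_neg h, if_pos hlen]
        have p1 : mlPack buf (PySem.Str.strip l :: (rest.map PySem.Str.strip).takeWhile (fun s => !(s == "")))
            = PySem.Str.join " " (buf ++ [PySem.Str.strip l])
              :: mlPack [] ((rest.map PySem.Str.strip).takeWhile (fun s => !(s == ""))) := by
          simp only [mlPack]; rw [if_pos hlen]
        rw [r1, p1, ih [], List.cons_append]
      · have r1 : mlRun buf (l :: rest) = mlRun (buf ++ [PySem.Str.strip l]) rest := by
          simp only [mlRun]; rw [if_neg h, if_neg hlen]
        have p1 : mlPack buf (PySem.Str.strip l :: (rest.map PySem.Str.strip).takeWhile (fun s => !(s == "")))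
            = mlPack (buf ++ [PySem.Str.strip l]) ((rest.map PySem.Str.strip).takeWhile (fun s => !(s == ""))) := by
          simp only [mlPack]; rw [if_neg hlen]
        rw [r1, p1, ih (buf ++ [PySem.Str.strip l])]

-- ===== VERDICT (by name: the statement is the Claim_ definition above) =====
theorem merge_lines_into_blocks_py_spec : Claim_equal_merge_lines_into_blocks_py := by
  intro lines _
  unfold Spec_merge_lines_into_blocks_py
  have h1 : merge_lines_into_blocks_py lines = mlFinish (lines.foldl mlStepA ([], [])) := rfl
  rw [h1, mlRun_foldA lines [] [], mlRun_eq_pack lines [], ← flatMap_mlGroups_split,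
    List.nil_append]
  rfl
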